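-- pv_equiv track=rewrite | github.com/FRCStudents/Cracking2017 | python/MrKrug/play/mvc3/view.py | printLine
-- ===== SOURCE A (Python) =====
-- def printLine(line):
-- 	holdLine = line
-- 	l = len(holdLine)
-- 	while l < 37:
-- 		holdLine = '\t' + holdLine + '\t'
-- 		l += 16
-- 	while l < 48:
-- 		holdLine += '\t'
-- 		l += 8
--
-- 	holdLine = '*' + holdLine + '*'
-- 	return holdLine
-- ===== SOURCE B (Python) =====
-- def printLine(line):
--     l = len(line)
--     n1 = max(0, (52 - l) // 16)
--     n2 = max(0, (55 - (l + 16 * n1)) // 8)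
--     return '*' + '\t' * n1 + line + '\t' * (n1 + n2) + '*'
-- ===== Notes on version B (the rewrite author's own statement) =====
-- stated objective: simpler
-- what changed: Replaced both padding while-loops with closed-form tab counts computed by floor division (n1 = max(0,(52-l)//16), n2 = max(0,(55-l1)//8)) and string repetition.
import Mathlib
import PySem

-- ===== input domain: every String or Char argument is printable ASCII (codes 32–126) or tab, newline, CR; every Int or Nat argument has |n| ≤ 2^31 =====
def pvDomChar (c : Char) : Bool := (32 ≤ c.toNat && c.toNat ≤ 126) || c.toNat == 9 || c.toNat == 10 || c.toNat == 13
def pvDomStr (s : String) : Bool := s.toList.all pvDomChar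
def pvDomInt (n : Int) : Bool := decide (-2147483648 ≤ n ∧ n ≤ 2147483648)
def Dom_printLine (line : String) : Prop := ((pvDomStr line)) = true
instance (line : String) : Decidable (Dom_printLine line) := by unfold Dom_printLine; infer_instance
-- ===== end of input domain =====

-- B replaces A's two padding while-loops by closed-form tab counts (floor divisions) and
-- string repetition; objective: simpler, same cost.

-- ===== PORT A =====
-- first while loop: while l < 37: holdLine = '\t' + holdLine + '\t'; l += 16
def pvLoop1 (h : List Char) (l : Int) : List Char × Int :=
  if l < 37 then pvLoop1 ('\t' :: h ++ ['\t']) (l + 16) else (h, l)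
termination_by (37 - l).toNat
decreasing_by omega

-- second while loop: while l < 48: holdLine += '\t'; l += 8
def pvLoop2 (h : List Char) (l : Int) : List Char :=
  if l < 48 then pvLoop2 (h ++ ['\t']) (l + 8) else h
termination_by (48 - l).toNat
decreasing_by omega

def printLine (line : String) : String :=
  let p := pvLoop1 line.toList (line.toList.length : Int)
  String.mk ('*' :: (pvLoop2 p.1 p.2 ++ ['*']))

-- ===== PORT B =====
def printLine_alt (line : String) : String :=
  let l : Int := line.toList.length
  let n1 : Nat := (max 0 (PySem.Int.floordiv (52 - l) 16)).toNat
  let n2 : Nat := (max 0 (PySem.Int.floordiv (55 - (l + 16 * (n1 : Int))) 8)).toNat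
  String.mk ('*' :: (List.replicate n1 '\t' ++ line.toList ++ List.replicate (n1 + n2) '\t' ++ ['*']))

-- ===== PRECONDITION & SPEC =====
def Spec_printLine (line : String) (out : String) : Prop := out = printLine_alt line
instance (line : String) (out : String) : Decidable (Spec_printLine line out) := by unfold Spec_printLine; infer_instance

-- ===== CLAIM (what is proved, stated in full; the proofs are below) =====
def Claim_equal_printLine : Prop := ∀ (line : String), Dom_printLine line → Spec_printLine line (printLine line)

-- ===== LEMMAS AND PROOFS =====
lemma pvLoop1_eq (h : List Char) (l : Int) :
    pvLoop1 h l =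
      (List.replicate (max 0 (PySem.Int.floordiv (52 - l) 16)).toNat '\t' ++ h ++
         List.replicate (max 0 (PySem.Int.floordiv (52 - l) 16)).toNat '\t',
       l + 16 * ((max 0 (PySem.Int.floordiv (52 - l) 16)).toNat : Int)) := by
  induction h, l using pvLoop1.induct with
  | case1 h l hl ih =>
    rw [pvLoop1, if_pos hl, ih]
    have hn : (max 0 (PySem.Int.floordiv (52 - l) 16)).toNat
        = (max 0 (PySem.Int.floordiv (52 - (l + 16)) 16)).toNat + 1 := by
      simp only [PySem.Int.floordiv, Int.fdiv_eq_ediv]; omega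
    rw [hn]
    simp only [Prod.mk.injEq]
    refine ⟨?_, by push_cast; ring⟩
    simp only [List.replicate_succ, List.cons_append, List.append_assoc]
    rw [List.append_cons, ← List.replicate_succ', List.replicate_succ, List.cons_append]
    simp
  | case2 h l hl =>
    rw [pvLoop1, if_neg hl]
    have hn : (max 0 (PySem.Int.floordiv (52 - l) 16)).toNat = 0 := by
      simp only [PySem.Int.floordiv, Int.fdiv_eq_ediv]; omega
    rw [hn]; simp

lemma pvLoop2_eq (h : List Char) (l : Int) :
    pvLoop2 h l = h ++ List.replicate (max 0 (PySem.Int.floordiv (55 - l) 8)).toNat '\t' := by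
  induction h, l using pvLoop2.induct with
  | case1 h l hl ih =>
    rw [pvLoop2, if_pos hl, ih]
    have hn : (max 0 (PySem.Int.floordiv (55 - l) 8)).toNat
        = (max 0 (PySem.Int.floordiv (55 - (l + 8)) 8)).toNat + 1 := by
      simp only [PySem.Int.floordiv, Int.fdiv_eq_ediv]; omega
    rw [hn]
    simp [List.replicate_succ]
  | case2 h l hl =>
    rw [pvLoop2, if_neg hl]
    have hn : (max 0 (PySem.Int.floordiv (55 - l) 8)).toNat = 0 := by
      simp only [PySem.Int.floordiv, Int.fdiv_eq_ediv]; omega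
    rw [hn]; simp

-- ===== VERDICT (by name: the statement is the Claim_ definition above) =====
theorem printLine_spec : Claim_equal_printLine := by
  intro line _
  unfold Spec_printLine printLine printLine_alt
  simp only [pvLoop1_eq, pvLoop2_eq]
  congr 1
  simp [List.append_assoc]
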